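-- pv_equiv track=rewrite | github.com/dideek/Wordle-Solver | wordle_guide.py | string2color
-- ===== SOURCE A (Python) =====
-- def string2color(s):
--     colors = 0
--     guide = {"g":3,"y":1,"b":0}
--     for letter in s:
--         colors += guide[letter]
--         colors*=4
--     colors//=4
--
--     return colors
-- ===== SOURCE B (Python) =====
-- def string2color(s):
--     guide = {"g": 3, "y": 1, "b": 0}
--     colors = 0
--     place = 1
--     for letter in reversed(s):
--         colors += guide[letter] * place
--         place *= 4
--     return colors
-- ===== Notes on version B (the rewrite author's own statement) =====
-- stated objective: alternative
-- what changed: Replaces the left-to-right Horner accumulation (multiply by 4 each step, then a final floor-division undoing the extra factor) with a right-to-left place-value summation that maintains a running power of 4, needing no final division.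
import Mathlib
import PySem

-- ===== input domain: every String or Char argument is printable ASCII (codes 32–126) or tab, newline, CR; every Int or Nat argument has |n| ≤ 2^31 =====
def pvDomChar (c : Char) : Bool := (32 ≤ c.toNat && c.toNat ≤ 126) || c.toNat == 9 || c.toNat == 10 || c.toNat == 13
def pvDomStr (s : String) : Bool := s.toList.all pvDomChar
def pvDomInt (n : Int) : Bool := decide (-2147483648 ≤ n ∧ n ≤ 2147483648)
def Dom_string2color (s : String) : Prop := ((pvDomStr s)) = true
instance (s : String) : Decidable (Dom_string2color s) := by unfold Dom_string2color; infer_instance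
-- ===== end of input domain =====

-- B re-implements the g/y/b→base-4 encoding as a right-to-left place-value sum
-- (running power of 4) instead of A's Horner multiply-then-final-floordiv; equal return values on Pre_.


-- ===== PORT A =====
-- guide = {"g":3,"y":1,"b":0}
def pvGuide : PySem.Dict Char Int := PySem.Dict.ofList [('g', 3), ('y', 1), ('b', 0)]

-- guide[letter] raises KeyError on other characters; ported as getD 0, those inputs excluded by Pre_.
def string2color (s : String) : Int :=
  PySem.Int.floordiv (s.toList.foldl (fun colors letter => (colors + pvGuide.getD letter 0) * 4) 0) 4

-- ===== PORT B =====
def string2color_alt (s : String) : Int :=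
  (s.toList.reverse.foldl
    (fun (st : Int × Int) letter => (st.1 + pvGuide.getD letter 0 * st.2, st.2 * 4))
    (0, 1)).1

-- ===== PRECONDITION & SPEC =====
-- Pre_ excludes exactly the strings containing a character other than 'g','y','b',
-- on which the Python A (and B) raises KeyError.
def Pre_string2color (s : String) : Prop := s.toList.all (fun c => c == 'g' || c == 'y' || c == 'b') = true
instance (s : String) : Decidable (Pre_string2color s) := by unfold Pre_string2color; infer_instance
def pvWitness_string2color : String := "gybbg"

def Spec_string2color (s : String) (out : Int) : Prop := out = string2color_alt s
instance (s : String) (out : Int) : Decidable (Spec_string2color s out) := by unfold Spec_string2color; infer_instance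

-- ===== CLAIM (what is proved, stated in full; the proofs are below) =====
def Claim_equal_string2color : Prop :=
  ∀ (s : String), Dom_string2color s → Pre_string2color s → Spec_string2color s (string2color s)

-- ===== LEMMAS AND PROOFS =====

/-- The place-value sum Σ g(l i) * 4^(n-1-i), defined structurally. -/
def pvVal : List Char → Int
  | [] => 0
  | c :: t => pvGuide.getD c 0 * 4 ^ t.length + pvVal t

theorem pvFoldA (l : List Char) (c : Int) :
    l.foldl (fun colors letter => (colors + pvGuide.getD letter 0) * 4) c
      = c * 4 ^ l.length + 4 * pvVal l := by
  induction l generalizing c with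
  | nil => simp [pvVal]
  | cons ch t ih =>
    simp only [List.foldl_cons, ih, pvVal, List.length_cons]
    ring

theorem pvFoldB (l : List Char) (c p : Int) :
    l.reverse.foldl
        (fun (st : Int × Int) letter => (st.1 + pvGuide.getD letter 0 * st.2, st.2 * 4))
        (c, p)
      = (c + p * pvVal l, p * 4 ^ l.length) := by
  induction l generalizing c p with
  | nil => simp [pvVal]
  | cons ch t ih =>
    simp only [List.reverse_cons, List.foldl_append, List.foldl_cons, List.foldl_nil, ih,
      pvVal, List.length_cons]
    exact Prod.ext (by ring) (by ring)

-- ===== VERDICT (by name: the statement is the Claim_ definition above) =====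
theorem string2color_spec : Claim_equal_string2color := by
  intro s _ _
  unfold Spec_string2color string2color string2color_alt
  rw [pvFoldA, pvFoldB]
  simp only [zero_mul, zero_add, one_mul]
  rw [PySem.Int.floordiv_eq_ediv_of_pos (by norm_num)]
  omega
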